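-- pv_equiv track=rewrite | github.com/silv-4/IRM-Project | script.py | count_blm
-- ===== SOURCE A (Python) =====
-- def count_blm(tags, tweets_split):
--     """Takes a list of tags and a list of words of split tweets and returns
--     a count of mentions of the specific tags as well as the tags mentioned"""
--     counter = 0
--     counted = []
--
--     # Checks whether the word is equal to the tag, and counts if True
--     for word in tweets_split:
--         for tag in tags:
--             if word == tag:
--                 counter += 1
--                 counted.append(word)
--
--     return counter, set(counted)
-- ===== SOURCE B (Python) =====
-- def count_blm(tags, tweets_split):
--     """Takes a list of tags and a list of words of split tweets and returns
--     a count of mentions of the specific tags as well as the tags mentioned"""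
--     # Build a frequency table of the tags once, then make one pass over the
--     # tweet words, adding the tag multiplicity of each matching word.
--     tag_count = {}
--     for t in tags:
--         tag_count[t] = tag_count.get(t, 0) + 1
--
--     counter = 0
--     matched = []
--     for w in tweets_split:
--         c = tag_count.get(w, 0)
--         if c:
--             counter += c
--             matched.append(w)
--
--     return counter, set(matched)
-- ===== Notes on version B (the rewrite author's own statement) =====
-- stated objective: faster
-- what changed: Replaces the nested scan over tags for every tweet word by a tag frequency table built once plus a single pass over the tweet words that adds each word's tag multiplicity.
import Mathlib
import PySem

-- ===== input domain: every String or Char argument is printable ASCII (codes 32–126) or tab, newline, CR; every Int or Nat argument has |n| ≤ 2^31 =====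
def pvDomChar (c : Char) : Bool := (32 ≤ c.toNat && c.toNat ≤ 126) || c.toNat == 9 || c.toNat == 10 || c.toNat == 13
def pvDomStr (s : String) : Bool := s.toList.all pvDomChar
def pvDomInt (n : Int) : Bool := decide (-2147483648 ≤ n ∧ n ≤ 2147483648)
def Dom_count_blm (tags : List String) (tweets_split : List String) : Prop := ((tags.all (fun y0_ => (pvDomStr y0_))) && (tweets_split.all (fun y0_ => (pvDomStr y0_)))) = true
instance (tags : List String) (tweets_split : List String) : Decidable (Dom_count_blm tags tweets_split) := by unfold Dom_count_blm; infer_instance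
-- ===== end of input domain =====

-- B builds a tag frequency table once and makes one pass over the tweet words
-- (O(n+m) instead of A's nested O(n*m) scan); same return value.

-- ===== PORT A =====
def count_blm (tags : List String) (tweets_split : List String) : Int × List String :=
  let st :=
    tweets_split.foldl (fun (acc : Int × List String) word =>
      tags.foldl (fun (acc : Int × List String) tag =>
        if word == tag then (acc.1 + 1, acc.2 ++ [word]) else acc) acc)
      (0, [])
  (st.1, PySem.Set.ofList st.2)

-- ===== PORT B =====
def count_blm_alt (tags : List String) (tweets_split : List String) : Int × List String :=
  let tag_count :=
    tags.foldl (fun (d : PySem.Dict String Int) t => d.insert t (d.getD t 0 + 1)) PySem.Dict.empty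
  let st :=
    tweets_split.foldl (fun (acc : Int × List String) w =>
      let c := tag_count.getD w 0
      if c ≠ 0 then (acc.1 + c, acc.2 ++ [w]) else acc)
      (0, [])
  (st.1, PySem.Set.ofList st.2)

-- ===== PRECONDITION & SPEC =====
def Spec_count_blm (tags : List String) (tweets_split : List String) (out : Int × List String) : Prop := out = count_blm_alt tags tweets_split
instance (tags : List String) (tweets_split : List String) (out : Int × List String) : Decidable (Spec_count_blm tags tweets_split out) := by unfold Spec_count_blm; infer_instance

-- ===== CLAIM (what is proved, stated in full; the proofs are below) =====
def Claim_equal_count_blm : Prop := ∀ (tags : List String) (tweets_split : List String), Dom_count_blm tags tweets_split → Spec_count_blm tags tweets_split (count_blm tags tweets_split)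

-- ===== LEMMAS AND PROOFS =====

-- A's inner loop over tags adds tags.count word to the counter and appends that many copies of word.
theorem count_blm_inner (tags : List String) (word : String) (acc : Int × List String) :
    tags.foldl (fun (acc : Int × List String) tag =>
      if word == tag then (acc.1 + 1, acc.2 ++ [word]) else acc) acc
    = (acc.1 + tags.count word, acc.2 ++ List.replicate (tags.count word) word) := by
  induction tags generalizing acc with
  | nil => simp
  | cons t ts ih =>
    simp only [List.foldl_cons, List.count_cons, ih]
    by_cases h : word = t
    · subst h
      simp only [beq_self_eq_true, if_pos]
      refine Prod.ext (by push_cast; ring) ?_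
      simp only [List.append_assoc, List.singleton_append]
      rw [← List.replicate_succ, List.replicate_succ']
    · simp [h, Ne.symm h]

-- A's outer loop, characterised.
theorem count_blm_outer (tags : List String) (tweets : List String) (acc : Int × List String) :
    tweets.foldl (fun (acc : Int × List String) word =>
      tags.foldl (fun (acc : Int × List String) tag =>
        if word == tag then (acc.1 + 1, acc.2 ++ [word]) else acc) acc) acc
    = (acc.1 + (tweets.map (fun w => (tags.count w : Int))).sum,
       acc.2 ++ tweets.flatMap (fun w => List.replicate (tags.count w) w)) := by
  induction tweets generalizing acc with
  | nil => simp
  | cons w ws ih =>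
    simp only [List.foldl_cons]
    rw [ih, count_blm_inner]
    refine Prod.ext (by simp; ring) (by simp)

-- B's frequency table looks up the tag multiplicity.
theorem count_blm_table (tags : List String) (w : String) :
    (tags.foldl (fun (d : PySem.Dict String Int) t => d.insert t (d.getD t 0 + 1))
      PySem.Dict.empty).getD w 0 = (tags.count w : Int) := by
  rw [PySem.Dict.getD_foldl_insert_add_one]
  simp [PySem.Dict.getD_empty]

-- B's loop, characterised.
theorem count_blm_alt_outer (tags : List String) (tweets : List String) (acc : Int × List String) :
    tweets.foldl (fun (acc : Int × List String) w =>
      let c := (tags.foldl (fun (d : PySem.Dict String Int) t => d.insert t (d.getD t 0 + 1))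
        PySem.Dict.empty).getD w 0
      if c ≠ 0 then (acc.1 + c, acc.2 ++ [w]) else acc) acc
    = (acc.1 + (tweets.map (fun w => (tags.count w : Int))).sum,
       acc.2 ++ tweets.filter (fun w => tags.count w ≠ 0)) := by
  induction tweets generalizing acc with
  | nil => simp
  | cons w ws ih =>
    simp only [List.foldl_cons]
    rw [ih]
    simp only [count_blm_table, List.filter_cons, List.map_cons, List.sum_cons]
    by_cases h : tags.count w = 0
    · simp [h]
    · have h' : ((tags.count w : Int)) ≠ 0 := by exact_mod_cast h
      simp only [h', ne_eq, not_false_eq_true, if_pos, h, decide_true]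
      refine Prod.ext (by push_cast; ring) (by simp)

-- Updating a set with n+1 copies of w is the same as adding w once.
theorem set_update_replicate (s : PySem.Set String) (w : String) (n : Nat) :
    PySem.Set.update s (List.replicate (n + 1) w) = PySem.Set.add s w := by
  induction n generalizing s with
  | zero => simp [PySem.Set.update_cons, PySem.Set.update_nil]
  | succ k ih =>
    rw [List.replicate_succ, PySem.Set.update_cons, ih (PySem.Set.add s w)]
    exact PySem.Set.add_of_mem (by rw [PySem.Set.mem_add]; right; rfl)

-- The two matched collections have the same set.
theorem set_flatMap_eq_filter (tags : List String) (tweets : List String) (s : PySem.Set String) :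
    PySem.Set.update s (tweets.flatMap (fun w => List.replicate (tags.count w) w))
    = PySem.Set.update s (tweets.filter (fun w => tags.count w ≠ 0)) := by
  induction tweets generalizing s with
  | nil => simp
  | cons w ws ih =>
    rw [List.flatMap_cons, List.filter_cons, PySem.Set.update_append]
    by_cases h : tags.count w = 0
    · simp only [h, List.replicate_zero, PySem.Set.update_nil, ih]
      simp
    · obtain ⟨m, hm⟩ := Nat.exists_eq_succ_of_ne_zero h
      rw [hm, set_update_replicate s w m, ih]
      simp [PySem.Set.update_cons]

-- ===== VERDICT (by name: the statement is the Claim_ definition above) =====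
theorem count_blm_spec : Claim_equal_count_blm := by
  intro tags tweets _
  show count_blm tags tweets = count_blm_alt tags tweets
  unfold count_blm count_blm_alt
  simp only [count_blm_outer, count_blm_alt_outer]
  refine Prod.ext (by simp) ?_
  simp only [List.nil_append]
  have h := set_flatMap_eq_filter tags tweets PySem.Set.empty
  simpa [PySem.Set.update_nil_left] using h
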